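-- pv_equiv track=rewrite | github.com/lukasgrunwald/pdos_surface_polaritons | pdos_surf/io_manager.py | partition_freq_array
-- ===== SOURCE A (Python) =====
-- def partition_freq_array(freq_array, n_subdivisions):
--     array_length = len(freq_array)
--     base_size = array_length // n_subdivisions
--     remainder = array_length % n_subdivisions
--
--     split_arrays = []
--     start_idx = 0
--
--     for i in range(n_subdivisions):
--         # Add one extra element to first 'remainder' subdivisions
--         size = base_size + (1 if i < remainder else 0)
--         end_idx = start_idx + size
--         split_arrays.append(freq_array[start_idx:end_idx])
--         start_idx = end_idx
--
--     return split_arrays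
-- ===== SOURCE B (Python) =====
-- def partition_freq_array(freq_array, n_subdivisions):
--     array_length = len(freq_array)
--     base_size = array_length // n_subdivisions
--     remainder = array_length % n_subdivisions
--     bounds = [base_size * i + min(i, remainder) for i in range(n_subdivisions + 1)]
--     return [freq_array[a:b] for a, b in zip(bounds, bounds[1:])]
-- ===== Notes on version B (the rewrite author's own statement) =====
-- stated objective: alternative
-- what changed: Replaces the single loop threading a running start_idx through slice-and-append with a closed-form boundary table bounds[i] = base_size*i + min(i, remainder) built in one comprehension, then a second pass slicing between consecutive boundaries via zip.
import Mathlib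
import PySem

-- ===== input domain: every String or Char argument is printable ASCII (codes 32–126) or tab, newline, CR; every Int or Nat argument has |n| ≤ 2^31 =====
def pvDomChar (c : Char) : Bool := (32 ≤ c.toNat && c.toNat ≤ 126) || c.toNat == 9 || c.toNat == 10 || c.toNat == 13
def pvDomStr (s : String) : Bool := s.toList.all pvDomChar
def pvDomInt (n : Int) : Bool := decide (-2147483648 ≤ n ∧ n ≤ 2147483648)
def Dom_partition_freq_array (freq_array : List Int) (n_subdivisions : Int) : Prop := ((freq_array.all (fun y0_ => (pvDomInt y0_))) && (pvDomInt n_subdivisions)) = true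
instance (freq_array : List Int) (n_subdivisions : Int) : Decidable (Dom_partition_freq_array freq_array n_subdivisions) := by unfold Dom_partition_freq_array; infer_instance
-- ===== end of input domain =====

-- B replaces A's running start_idx loop with a closed-form boundary table plus a zip-of-consecutive-boundaries pass (alternative decomposition, same cost).


-- ===== PORT A =====
def partition_freq_array (freq_array : List Int) (n_subdivisions : Int) : List (List Int) :=
  let array_length : Int := freq_array.length
  let base_size := PySem.Int.floordiv array_length n_subdivisions
  let remainder := PySem.Int.mod array_length n_subdivisions
  ((PySem.List.pyRange 0 n_subdivisions 1).foldl
    (fun (st : Int × List (List Int)) i =>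
      let size := base_size + (if i < remainder then 1 else 0)
      let end_idx := st.1 + size
      (end_idx, st.2 ++ [PySem.List.slice freq_array (some st.1) (some end_idx)]))
    (0, [])).2

-- ===== PORT B =====
def partition_freq_array_alt (freq_array : List Int) (n_subdivisions : Int) : List (List Int) :=
  let array_length : Int := freq_array.length
  let base_size := PySem.Int.floordiv array_length n_subdivisions
  let remainder := PySem.Int.mod array_length n_subdivisions
  let bounds := (PySem.List.pyRange 0 (n_subdivisions + 1) 1).map
    (fun i => base_size * i + min i remainder)
  (bounds.zip bounds.tail).map
    (fun p => PySem.List.slice freq_array (some p.1) (some p.2))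

-- ===== PRECONDITION & SPEC =====
-- Pre_ excludes exactly n_subdivisions = 0, where A (and B) raise ZeroDivisionError.
def Pre_partition_freq_array (freq_array : List Int) (n_subdivisions : Int) : Prop := n_subdivisions ≠ 0
instance (freq_array : List Int) (n_subdivisions : Int) : Decidable (Pre_partition_freq_array freq_array n_subdivisions) := by unfold Pre_partition_freq_array; infer_instance
def pvWitness_partition_freq_array : List Int × Int := ([1, 2, 3, 4, 5], 2)

def Spec_partition_freq_array (freq_array : List Int) (n_subdivisions : Int) (out : List (List Int)) : Prop := out = partition_freq_array_alt freq_array n_subdivisions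
instance (freq_array : List Int) (n_subdivisions : Int) (out : List (List Int)) : Decidable (Spec_partition_freq_array freq_array n_subdivisions out) := by unfold Spec_partition_freq_array; infer_instance

-- ===== CLAIM (what is proved, stated in full; the proofs are below) =====
def Claim_equal_partition_freq_array : Prop := ∀ (freq_array : List Int) (n_subdivisions : Int), Dom_partition_freq_array freq_array n_subdivisions → Pre_partition_freq_array freq_array n_subdivisions → Spec_partition_freq_array freq_array n_subdivisions (partition_freq_array freq_array n_subdivisions)

-- ===== LEMMAS AND PROOFS =====

-- Consecutive pairs of a unit range zip with its tail.
lemma zip_tail_pyRange : ∀ (k : Nat) (a : Int),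
    (PySem.List.pyRange a (a + k) 1).zip (PySem.List.pyRange a (a + k) 1).tail
      = (PySem.List.pyRange a (a + k - 1) 1).map (fun i => (i, i + 1)) := by
  intro k
  induction k with
  | zero =>
    intro a
    rw [PySem.List.pyRange_one_eq_nil (by omega), PySem.List.pyRange_one_eq_nil (by omega)]
    simp
  | succ j ih =>
    intro a
    rcases Nat.eq_zero_or_pos j with hj | hj
    · subst hj
      rw [PySem.List.pyRange_one_cons (by push_cast; omega)]
      rw [PySem.List.pyRange_one_eq_nil (by push_cast; omega),
          PySem.List.pyRange_one_eq_nil (by push_cast; omega)]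
      simp
    · have h2 := ih (a + 1)
      rw [show ((j + 1 : Nat) : Int) = (j : Int) + 1 by push_cast; ring,
          show a + ((j : Int) + 1) = (a + 1) + (j : Int) by ring]
      rw [PySem.List.pyRange_one_cons (show a < a + 1 + (j : Int) by omega)]
      rw [PySem.List.pyRange_one_cons (show a + 1 < a + 1 + (j : Int) by omega)]
      rw [PySem.List.pyRange_one_cons (show a + 1 < a + 1 + (j : Int) by omega)] at h2
      simp only [List.tail_cons, List.zip_cons_cons] at h2 ⊢
      rw [h2]
      rw [show a + 1 + (j : Int) - 1 = (a + 1) + ((j : Int) - 1) by ring]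
      rw [PySem.List.pyRange_one_cons (show a < (a + 1) + ((j : Int) - 1) by omega)]
      simp

-- A's loop, started at boundary base*a + min a r, produces exactly the boundary-to-boundary slices.
lemma loopA (freq : List Int) (base r : Int) :
    ∀ (k : Nat) (a : Int), 0 ≤ a → ∀ (acc : List (List Int)),
    (PySem.List.pyRange a (a + k) 1).foldl
      (fun (st : Int × List (List Int)) i =>
        let size := base + (if i < r then 1 else 0)
        let end_idx := st.1 + size
        (end_idx, st.2 ++ [PySem.List.slice freq (some st.1) (some end_idx)]))
      (base * a + min a r, acc)
    = (base * (a + k) + min (a + k) r,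
       acc ++ (PySem.List.pyRange a (a + k) 1).map
         (fun i => PySem.List.slice freq (some (base * i + min i r)) (some (base * (i + 1) + min (i + 1) r)))) := by
  intro k
  induction k with
  | zero =>
    intro a ha acc
    rw [PySem.List.pyRange_one_eq_nil (by omega)]
    simp
  | succ j ih =>
    intro a ha acc
    rw [show a + (j + 1 : Nat) = (a + 1) + (j : Nat) by push_cast; ring]
    rw [PySem.List.pyRange_one_cons (by omega)]
    simp only [List.foldl_cons]
    have hb : base * (a + 1) = base * a + base := by ring
    have hstep : base * a + min a r + (base + (if a < r then 1 else 0))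
        = base * (a + 1) + min (a + 1) r := by
      split_ifs with h <;> omega
    rw [hstep]
    rw [ih (a + 1) (by omega)]
    simp [List.append_assoc]

-- Both sides on a negative subdivision count: empty result.
lemma both_nil_of_neg (freq : List Int) (n : Int) (hn : n < 0) :
    partition_freq_array freq n = [] ∧ partition_freq_array_alt freq n = [] := by
  constructor
  · unfold partition_freq_array
    rw [PySem.List.pyRange_one_eq_nil (by omega)]
    rfl
  · unfold partition_freq_array_alt
    rw [PySem.List.pyRange_one_eq_nil (by omega)]
    rfl

-- ===== VERDICT (by name: the statement is the Claim_ definition above) =====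
theorem partition_freq_array_spec : Claim_equal_partition_freq_array := by
  intro freq n _ hn
  unfold Spec_partition_freq_array
  rcases lt_trichotomy n 0 with h | h | h
  · rcases both_nil_of_neg freq n h with ⟨h1, h2⟩
    rw [h1, h2]
  · exact absurd h hn
  · -- n > 0
    simp only [partition_freq_array, partition_freq_array_alt]
    set L : Int := (freq.length : Int) with hL
    set base := PySem.Int.floordiv L n with hbase
    set r := PySem.Int.mod L n with hrdef
    have hr : 0 ≤ r := PySem.Int.mod_nonneg L h
    -- A side
    have hA := loopA freq base r n.toNat 0 le_rfl []
    simp only [mul_zero, zero_add, min_eq_left hr, List.nil_append] at hA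
    rw [show ((n.toNat : Int)) = n by omega] at hA
    rw [hA]
    -- B side
    have hB := zip_tail_pyRange (n.toNat + 1) 0
    rw [show (0 : Int) + ((n.toNat + 1 : Nat) : Int) = n + 1 by push_cast; omega,
        show (n : Int) + 1 - 1 = n by ring] at hB
    simp only [← List.map_tail, List.zip_map, hB, List.map_map]
    simp [Prod.map]
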